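-- pv_equiv track=rewrite | github.com/bhmagic/BluePyOptDumpMod | YT_example/CMA_multi_stage/making_feature_file_v12.py | current_picker_send_lowest_firing
-- ===== SOURCE A (Python) =====
-- def current_picker_lowest_firing(all_current,all_spike):
--     c_temp = []
--     for ii in range(len(all_spike)):
--         if (all_spike[ii]>0) and (all_current[ii]>0):
--             c_temp.append(all_current[ii])
--     return min(c_temp)
--
-- def current_picker_send_lowest_firing(all_current,all_spike):
--     lnf = current_picker_lowest_firing(all_current,all_spike)
--     c_temp = []
--     for ii in range(len(all_spike)):
--         if (all_spike[ii]>0) and (all_current[ii]>lnf):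
--             c_temp.append(all_current[ii])
--     if (len(c_temp)>0):
--         return min(c_temp)
--     else:
--         return lnf
-- ===== SOURCE B (Python) =====
-- def current_picker_send_lowest_firing(all_current, all_spike):
--     m1 = None
--     m2 = None
--     for c, s in zip(all_current, all_spike):
--         if s > 0 and c > 0:
--             if m1 is None:
--                 m1 = c
--             elif c < m1:
--                 m2 = m1
--                 m1 = c
--             elif c > m1 and (m2 is None or c < m2):
--                 m2 = c
--     if m1 is None:
--         raise ValueError("no qualifying current")
--     return m1 if m2 is None else m2
-- ===== Notes on version B (the rewrite author's own statement) =====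
-- stated objective: alternative
-- what changed: Replaces A's three passes (build qualifying list, min, rebuild list of currents above that min, min again) by a single pass over zip(all_current, all_spike) tracking the smallest and the smallest strictly greater qualifying current, with no intermediate lists.
import Mathlib
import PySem

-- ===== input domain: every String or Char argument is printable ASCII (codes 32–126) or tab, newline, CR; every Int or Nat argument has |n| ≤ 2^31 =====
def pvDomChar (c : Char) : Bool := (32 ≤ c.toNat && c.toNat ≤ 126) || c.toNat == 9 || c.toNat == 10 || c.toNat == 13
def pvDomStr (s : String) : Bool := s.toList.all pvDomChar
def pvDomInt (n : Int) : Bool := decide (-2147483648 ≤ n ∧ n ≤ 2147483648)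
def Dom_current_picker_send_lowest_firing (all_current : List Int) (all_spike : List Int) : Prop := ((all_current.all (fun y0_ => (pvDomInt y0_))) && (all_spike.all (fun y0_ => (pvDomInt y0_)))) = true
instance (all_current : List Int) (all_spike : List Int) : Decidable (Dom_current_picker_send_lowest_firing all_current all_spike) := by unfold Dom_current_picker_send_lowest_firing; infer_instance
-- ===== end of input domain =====

-- B replaces A's three passes (build the qualifying list, min, rebuild the list of larger
-- currents, min again) by one pass over zip(all_current, all_spike) tracking the smallest
-- and the smallest strictly larger qualifying current (objective: alternative).

-- ===== PORT A =====
-- helper: Python current_picker_lowest_firing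
def current_picker_lowest_firing (all_current : List Int) (all_spike : List Int) : Int :=
  let c_temp := (PySem.List.pyRange 0 (all_spike.length : Int) 1).foldl
    (fun acc ii =>
      if 0 < PySem.List.pyGetD all_spike ii 0 ∧ 0 < PySem.List.pyGetD all_current ii 0 then
        acc ++ [PySem.List.pyGetD all_current ii 0]
      else acc) []
  (PySem.List.min? c_temp (fun x => x)).getD 0   -- min(c_temp); Pre_ guarantees c_temp ≠ []

def current_picker_send_lowest_firing (all_current : List Int) (all_spike : List Int) : Int :=
  let lnf := current_picker_lowest_firing all_current all_spike
  let c_temp := (PySem.List.pyRange 0 (all_spike.length : Int) 1).foldl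
    (fun acc ii =>
      if 0 < PySem.List.pyGetD all_spike ii 0 ∧ lnf < PySem.List.pyGetD all_current ii 0 then
        acc ++ [PySem.List.pyGetD all_current ii 0]
      else acc) []
  if 0 < c_temp.length then (PySem.List.min? c_temp (fun x => x)).getD 0 else lnf

-- ===== PORT B =====
-- one loop iteration of B: state = (smallest qualifying current so far, smallest one strictly above it)
def pvTwoMinStep (st : Option Int × Option Int) (p : Int × Int) : Option Int × Option Int :=
  if 0 < p.2 ∧ 0 < p.1 then
    match st.1 with
    | none => (some p.1, st.2)
    | some m =>
      if p.1 < m then (some p.1, some m)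
      else
        match st.2 with
        | none => if m < p.1 then (st.1, some p.1) else st
        | some n => if m < p.1 ∧ p.1 < n then (st.1, some p.1) else st
  else st

def current_picker_send_lowest_firing_alt (all_current : List Int) (all_spike : List Int) : Int :=
  let st := (all_current.zip all_spike).foldl pvTwoMinStep (none, none)
  match st.2 with
  | some v => v
  | none => st.1.getD 0   -- m1 is None: Python B raises ValueError there (outside Pre_)

-- ===== PRECONDITION & SPEC =====
-- Pre_ = exactly the inputs on which A returns: no positive spike at an index beyond the end
-- of all_current (else all_current[ii] raises IndexError), and at least one index with
-- spike > 0 and current > 0 (else min([]) raises ValueError).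
def Pre_current_picker_send_lowest_firing (all_current : List Int) (all_spike : List Int) : Prop :=
  (∀ i < all_spike.length, 0 < all_spike.getD i 0 → i < all_current.length) ∧
  (∃ i < all_spike.length, i < all_current.length ∧ 0 < all_spike.getD i 0 ∧ 0 < all_current.getD i 0)
instance (all_current : List Int) (all_spike : List Int) : Decidable (Pre_current_picker_send_lowest_firing all_current all_spike) := by unfold Pre_current_picker_send_lowest_firing; infer_instance
def pvWitness_current_picker_send_lowest_firing : List Int × List Int := ([1, 3], [1, 1])

def Spec_current_picker_send_lowest_firing (all_current : List Int) (all_spike : List Int) (out : Int) : Prop := out = current_picker_send_lowest_firing_alt all_current all_spike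
instance (all_current : List Int) (all_spike : List Int) (out : Int) : Decidable (Spec_current_picker_send_lowest_firing all_current all_spike out) := by unfold Spec_current_picker_send_lowest_firing; infer_instance

-- ===== CLAIM (what is proved, stated in full; the proofs are below) =====
def Claim_equal_current_picker_send_lowest_firing : Prop := ∀ (all_current : List Int) (all_spike : List Int), Dom_current_picker_send_lowest_firing all_current all_spike → Pre_current_picker_send_lowest_firing all_current all_spike → Spec_current_picker_send_lowest_firing all_current all_spike (current_picker_send_lowest_firing all_current all_spike)

-- ===== LEMMAS AND PROOFS =====


lemma loop_filter (P : Int → Prop) [DecidablePred P] :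
    ∀ (s c : List Int), (∀ i < s.length, 0 < s.getD i 0 → i < c.length) →
    ((List.range s.length).filter (fun k => decide (0 < s.getD k 0) && decide (P (c.getD k 0)))).map (fun k => c.getD k 0)
    = ((c.zip s).filter (fun p => decide (0 < p.2) && decide (P p.1))).map Prod.fst := by
  intro s
  induction s with
  | nil => intro c h; simp
  | cons b s' ih =>
    intro c h
    cases c with
    | nil =>
      have hnil : ∀ k ∈ List.range (b :: s').length, ¬ ((fun k => decide (0 < (b :: s').getD k 0) && decide (P (([]:List Int).getD k 0))) k = true) := by
        intro k hk
        simp only [List.mem_range] at hk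
        have hk2 := h k hk
        simp only [List.length_nil] at hk2
        simp only [Bool.and_eq_true, decide_eq_true_eq]
        rintro ⟨h1, _⟩
        omega
      rw [List.filter_eq_nil_iff.mpr hnil]
      simp
    | cons a c' =>
      simp only [List.length_cons]
      rw [List.range_succ_eq_map, List.filter_cons, List.filter_map]
      have h' : ∀ i < s'.length, 0 < s'.getD i 0 → i < c'.length := by
        intro i hi hs
        have h2 := h (i+1) (by simp only [List.length_cons]; omega)
        simp only [List.getD_cons_succ, List.length_cons] at h2
        exact Nat.lt_of_succ_lt_succ (h2 hs)
      have tail := ih c' h'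
      simp only [List.zip_cons_cons, List.filter_cons, List.getD_cons_zero,
        Function.comp_def, Nat.succ_eq_add_one, List.getD_cons_succ, List.map_map]
      by_cases hb : 0 < b
      · by_cases hp : P a
        · simp [hb, hp, Function.comp_def]
          simpa using tail
        · simp [hb, hp, Function.comp_def]
          simpa using tail
      · simp [hb, Function.comp_def]
        simpa using tail

-- qualifying currents, in order
def pvQual (c s : List Int) : List Int :=
  ((c.zip s).filter (fun p => decide (0 < p.2) && decide (0 < p.1))).map Prod.fst

lemma portA_loop (c s : List Int) (P : Int → Prop) [DecidablePred P]
    (h : ∀ i < s.length, 0 < s.getD i 0 → i < c.length) :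
    (PySem.List.pyRange 0 (s.length : Int) 1).foldl
      (fun acc ii =>
        if 0 < PySem.List.pyGetD s ii 0 ∧ P (PySem.List.pyGetD c ii 0) then
          acc ++ [PySem.List.pyGetD c ii 0]
        else acc) []
    = ((c.zip s).filter (fun p => decide (0 < p.2) && decide (P p.1))).map Prod.fst := by
  rw [PySem.List.foldl_append_ite]
  rw [← loop_filter P s c h]
  rw [PySem.List.pyRange_one]
  simp [List.filter_map, Function.comp_def, List.map_map]

-- the unguarded loop body of B (what pvTwoMinStep does once the qualifying test passed)
def pvCore (st : Option Int × Option Int) (x : Int) : Option Int × Option Int :=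
  match st.1 with
  | none => (some x, st.2)
  | some m =>
    if x < m then (some x, some m)
    else
      match st.2 with
      | none => if m < x then (st.1, some x) else st
      | some n => if m < x ∧ x < n then (st.1, some x) else st

-- running minimum of a list, as Python's min over a possibly empty list
def pvOm : List Int → Option Int
  | [] => none
  | x :: t => some (t.foldl min x)

def pvOsm (l : List Int) : Option Int :=
  match pvOm l with
  | none => none
  | some m => pvOm (l.filter (fun x => decide (m < x)))

lemma pvOm_le {l : List Int} {m : Int} (h : pvOm l = some m) : ∀ x ∈ l, m ≤ x := by
  cases l with
  | nil => simp [pvOm] at h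
  | cons x t =>
    simp only [pvOm, Option.some_inj] at h
    subst h
    intro y hy
    rcases List.mem_cons.mp hy with rfl | hy
    · exact (PySem.List.foldl_min_le t y).1
    · exact (PySem.List.foldl_min_le t x).2 y hy

lemma pvOm_append_singleton {l : List Int} {m : Int} (h : pvOm l = some m) (c : Int) :
    pvOm (l ++ [c]) = some (min m c) := by
  cases l with
  | nil => simp [pvOm] at h
  | cons x t =>
    simp only [pvOm, Option.some_inj] at h
    simp [pvOm, List.foldl_append, h]

lemma pvOm_eq_none {l : List Int} : pvOm l = none ↔ l = [] := by
  cases l <;> simp [pvOm]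

lemma pvOsm_some {l : List Int} {m : Int} (h : pvOm l = some m) :
    pvOsm l = pvOm (l.filter (fun x => decide (m < x))) := by
  simp [pvOsm, h]

-- the single-pass invariant: after any prefix l, the state is (min l, min of {x ∈ l | min l < x})
lemma twoMin_invariant (l : List Int) :
    l.foldl pvCore (none, none) = (pvOm l, pvOsm l) := by
  induction l using List.reverseRecOn with
  | nil => simp [pvOm, pvOsm]
  | append_singleton l c ih =>
    rw [List.foldl_append, ih]
    simp only [List.foldl_cons, List.foldl_nil]
    rcases hm : pvOm l with _ | m
    · -- l = []
      have hl : l = [] := pvOm_eq_none.mp hm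
      subst hl
      simp [pvCore, pvOsm, pvOm]
    · have happ := pvOm_append_singleton hm c
      rcases lt_trichotomy c m with hlt | rfl | hgt
      · -- c is a new minimum; the old minimum becomes the second
        have h1 : pvCore (some m, pvOsm l) c = (some c, some m) := by
          simp [pvCore, hlt]
        rw [min_eq_right hlt.le] at happ
        have hfl : l.filter (fun x => decide (c < x)) = l :=
          List.filter_eq_self.mpr (fun x hx => by
            have := pvOm_le hm x hx; simp only [decide_eq_true_eq]; omega)
        have h2 : pvOsm (l ++ [c]) = some m := by
          rw [pvOsm_some happ, List.filter_append, hfl]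
          simp [List.filter_cons, hm]
        rw [h1, happ, h2]
      · -- c equals the current minimum: nothing changes
        rw [min_self] at happ
        have h2 : pvOsm (l ++ [c]) = pvOsm l := by
          rw [pvOsm_some happ, List.filter_append]
          simp [List.filter_cons, pvOsm_some hm]
        rcases hsm : pvOsm l with _ | n
        · have h1 : pvCore (some c, none) c = (some c, none) := by
            simp [pvCore]
          rw [h1, happ, h2, hsm]
        · have h1 : pvCore (some c, some n) c = (some c, some n) := by
            simp [pvCore]
          rw [h1, happ, h2, hsm]
      · -- c is above the minimum: it may become the new second minimum
        rw [min_eq_left hgt.le] at happ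
        have hflapp : (l ++ [c]).filter (fun x => decide (m < x))
            = l.filter (fun x => decide (m < x)) ++ [c] := by
          rw [List.filter_append]
          simp [List.filter_cons, hgt]
        rcases hsm : pvOsm l with _ | n
        · -- no second minimum yet
          have hfl : l.filter (fun x => decide (m < x)) = [] := by
            have := pvOsm_some hm
            rw [hsm] at this
            exact pvOm_eq_none.mp this.symm
          have h1 : pvCore (some m, none) c = (some m, some c) := by
            simp [pvCore, hgt, not_lt.mpr hgt.le]
          have h2 : pvOsm (l ++ [c]) = some c := by
            rw [pvOsm_some happ, hflapp, hfl]
            simp [pvOm]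
          rw [h1, happ, h2]
        · -- second minimum n exists
          have hfl : pvOm (l.filter (fun x => decide (m < x))) = some n := by
            have := pvOsm_some hm
            rw [hsm] at this
            exact this.symm
          have happ2 := pvOm_append_singleton hfl c
          by_cases hcn : c < n
          · have h1 : pvCore (some m, some n) c = (some m, some c) := by
              simp [pvCore, hgt, hcn, not_lt.mpr hgt.le]
            have h2 : pvOsm (l ++ [c]) = some c := by
              rw [pvOsm_some happ, hflapp, happ2, min_eq_right hcn.le]
            rw [h1, happ, h2]
          · have h1 : pvCore (some m, some n) c = (some m, some n) := by
              simp [pvCore, hcn, not_lt.mpr hgt.le]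
            have h2 : pvOsm (l ++ [c]) = some n := by
              rw [pvOsm_some happ, hflapp, happ2, min_eq_left (not_lt.mp hcn)]
            rw [h1, happ, h2]

lemma second_filter (c s : List Int) (m : Int) (hm : 0 < m) :
    ((c.zip s).filter (fun p => decide (0 < p.2) && decide (m < p.1))).map Prod.fst
    = (pvQual c s).filter (fun y => decide (m < y)) := by
  unfold pvQual
  rw [List.filter_map, List.filter_filter]
  congr 1
  apply List.filter_congr
  intro p _
  by_cases h2 : 0 < p.2 <;> by_cases h3 : m < p.1 <;>
    simp [h2, h3, Function.comp_def] <;> omega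

lemma altB (c s : List Int) :
    (c.zip s).foldl pvTwoMinStep (none, none) = (pvOm (pvQual c s), pvOsm (pvQual c s)) := by
  have hstep : ∀ (st : Option Int × Option Int) (p : Int × Int),
      pvTwoMinStep st p = if 0 < p.2 ∧ 0 < p.1 then pvCore st p.1 else st := by
    rintro ⟨m1, m2⟩ p
    rcases m1 <;> rcases m2 <;> rfl
  have hcongr := PySem.List.foldl_congr_mem (l := c.zip s) (init := ((none, none) : Option Int × Option Int))
      (f := pvTwoMinStep) (g := fun st p => if 0 < p.2 ∧ 0 < p.1 then pvCore st p.1 else st)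
      (fun acc x _ => hstep acc x)
  rw [hcongr]
  rw [PySem.List.foldl_ite_eq_foldl_filter]
  rw [← twoMin_invariant (pvQual c s)]
  unfold pvQual
  rw [List.foldl_map]
  congr 1
  apply List.filter_congr
  intro p _
  simp

lemma qual_pos (c s : List Int) : ∀ y ∈ pvQual c s, 0 < y := by
  intro y hy
  unfold pvQual at hy
  obtain ⟨p, hp, rfl⟩ := List.mem_map.mp hy
  have := (List.mem_filter.mp hp).2
  simp only [Bool.and_eq_true, decide_eq_true_eq] at this
  exact this.2

theorem main_spec : ∀ (c s : List Int),
    ((∀ i < s.length, 0 < s.getD i 0 → i < c.length) ∧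
     (∃ i < s.length, i < c.length ∧ 0 < s.getD i 0 ∧ 0 < c.getD i 0)) →
    current_picker_send_lowest_firing c s = current_picker_send_lowest_firing_alt c s := by
  rintro c s ⟨h1, i, hi, hic, hs, hcpos⟩
  -- the qualifying list is nonempty
  have hmem : c.getD i 0 ∈ pvQual c s := by
    unfold pvQual
    refine List.mem_map.mpr ⟨(c.getD i 0, s.getD i 0), ?_, rfl⟩
    refine List.mem_filter.mpr ⟨?_, by simp only [Bool.and_eq_true, decide_eq_true_eq]; exact ⟨hs, hcpos⟩⟩
    have hlen : i < (c.zip s).length := by simp [List.length_zip]; omega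
    have hg : (c.zip s)[i]'hlen = ((c)[i]'hic, (s)[i]'hi) := List.getElem_zip
    have hmemz := List.getElem_mem hlen
    rw [hg] at hmemz
    rw [List.getD_eq_getElem c 0 hic, List.getD_eq_getElem s 0 hi]
    exact hmemz
  obtain ⟨x, t, hq⟩ : ∃ x t, pvQual c s = x :: t := by
    cases hq' : pvQual c s with
    | nil => rw [hq'] at hmem; simp at hmem
    | cons a b => exact ⟨a, b, rfl⟩
  have hOm : pvOm (pvQual c s) = some (t.foldl min x) := by rw [hq]; rfl
  set M := t.foldl min x with hM
  have hMpos : 0 < M := by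
    refine qual_pos c s M ?_
    rw [hq]
    rcases PySem.List.foldl_min_mem t x with hmm | hmm
    · have hMx : M = x := by rw [hM, hmm]
      rw [hMx]; exact List.mem_cons_self
    · rw [hM]; exact List.mem_cons_of_mem x hmm
  -- port A evaluated
  have hq1 := portA_loop c s (fun y => 0 < y) h1
  have hlnf : current_picker_lowest_firing c s = M := by
    simp only [current_picker_lowest_firing]
    rw [hq1]
    show (PySem.List.min? (pvQual c s) (fun y => y)).getD 0 = M
    rw [hq, PySem.List.min?_id_cons]
    rfl
  have hq2 := portA_loop c s (fun y => M < y) h1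
  have hA : current_picker_send_lowest_firing c s =
      (if 0 < ((pvQual c s).filter (fun y => decide (M < y))).length then
        (PySem.List.min? ((pvQual c s).filter (fun y => decide (M < y))) (fun y => y)).getD 0
      else M) := by
    simp only [current_picker_send_lowest_firing]
    rw [hlnf, hq2, second_filter c s M hMpos]
  -- port B evaluated
  have hB : current_picker_send_lowest_firing_alt c s =
      (match pvOsm (pvQual c s) with
       | some v => v
       | none => (pvOm (pvQual c s)).getD 0) := by
    simp only [current_picker_send_lowest_firing_alt]
    rw [altB]
  rw [hA, hB, pvOsm_some hOm]
  cases hfl : (pvQual c s).filter (fun y => decide (M < y)) with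
  | nil =>
    simp only [List.length_nil, lt_irrefl, if_false]
    rw [hq]
    simp [pvOm, ← hM]
  | cons y t' =>
    simp only [List.length_cons, pvOm]
    rw [PySem.List.min?_id_cons]
    simp

-- ===== VERDICT (by name: the statement is the Claim_ definition above) =====
theorem current_picker_send_lowest_firing_spec : Claim_equal_current_picker_send_lowest_firing := by
  intro c s _ hpre
  unfold Spec_current_picker_send_lowest_firing
  exact main_spec c s hpre
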